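-- pv_equiv track=rewrite | github.com/MetOffice/CSET | cset-workflow/lib/python/jinja_utils.py | restructure_field_list
-- ===== SOURCE A (Python) =====
-- import itertools
--
-- def _batched(iterable, n):
--     """Implement itertools.batched for Python < 3.12.
--
--     batched('ABCDEFG', 3) → ABC DEF G
--     https://docs.python.org/3/library/itertools.html#itertools.batched
--     """
--     if n < 1:
--         raise ValueError("n must be at least one")
--     iterator = iter(iterable)
--     while batch := tuple(itertools.islice(iterator, n)):
--         yield batch
--
-- def restructure_field_list(fields: list):
--     """Restructure a 1D list of fields into a 2D list."""
--     # ('m01s03i236', 'temp_at_screen_level', '', '', '', '', '', '', '', '',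
--     #  'm01s03i230', 'wind_speed_at_10m', '', '', '', '', '', '', '', '')
--     # -> [{1: "m01s03i236", 2: "temp_at_screen_level"},
--     #     {1: "m01s03i230", 2: "wind_speed_at_10m"}]
--     max_number_of_models = 10
--     assert len(fields) % max_number_of_models == 0
--     # itertools.batched is from python 3.12
--     batched = getattr(itertools, "batched", _batched)
--     all_fields = batched(fields, max_number_of_models)
--     rearranged = [
--         {
--             field[0] + 1: field[1]
--             for field in enumerate(equivalent_model_fields)
--             if field[1]
--         }
--         for equivalent_model_fields in all_fields
--     ]
--     return rearranged
-- ===== SOURCE B (Python) =====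
-- def restructure_field_list(fields: list):
--     """Restructure a 1D list of fields into a 2D list.
--
--     Single flat pass: start a fresh dict every 10 items, fill it via
--     modular arithmetic; no batching helper, no nested comprehension.
--     """
--     max_number_of_models = 10
--     assert len(fields) % max_number_of_models == 0
--     rearranged = []
--     for i, value in enumerate(fields):
--         if i % max_number_of_models == 0:
--             rearranged.append({})
--         if value:
--             rearranged[-1][i % max_number_of_models + 1] = value
--     return rearranged
-- ===== Notes on version B (the rewrite author's own statement) =====
-- stated objective: simpler
-- what changed: Replaces the chunk-into-10s generator (custom itertools.batched backport) plus nested dict-comprehension with one flat enumerate loop that starts a fresh dict every 10th index and fills it via modular arithmetic.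
import Mathlib
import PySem

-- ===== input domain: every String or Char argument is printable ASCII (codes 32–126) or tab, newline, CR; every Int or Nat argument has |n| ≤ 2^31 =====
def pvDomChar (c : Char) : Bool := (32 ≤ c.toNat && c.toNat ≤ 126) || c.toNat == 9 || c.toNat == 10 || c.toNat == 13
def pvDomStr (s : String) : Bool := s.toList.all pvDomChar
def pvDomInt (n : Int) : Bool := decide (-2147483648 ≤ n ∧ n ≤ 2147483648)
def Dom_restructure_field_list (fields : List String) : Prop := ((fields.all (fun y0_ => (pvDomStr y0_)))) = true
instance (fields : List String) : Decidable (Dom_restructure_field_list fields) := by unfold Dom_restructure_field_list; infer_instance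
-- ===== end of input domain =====

-- B replaces A's chunk-into-10s generator + nested dict-comprehension with one flat
-- enumerate pass keeping the current group's dict via modular arithmetic (objective: simpler).

-- ===== PORT A =====
-- _batched(fields, 10): successive nonempty chunks of 10 (the while-yield loop)
def pvBatched : List String → List (List String)
  | [] => []
  | x :: xs => (x :: xs).take 10 :: pvBatched ((x :: xs).drop 10)
termination_by xs => xs.length
decreasing_by simp

-- the dict comprehension over enumerate(chunk): counter-carrying fold, Dict.insert per truthy field
def pvChunkStep (p : Int × PySem.Dict Int String) (v : String) : Int × PySem.Dict Int String :=
  (p.1 + 1, if v ≠ "" then p.2.insert (p.1 + 1) v else p.2)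

def restructure_field_list (fields : List String) : List (List (Int × String)) :=
  (pvBatched fields).map (fun g => (g.foldl pvChunkStep (0, PySem.Dict.empty)).2.items)

-- ===== PORT B =====
-- loop body: i % 10 == 0 → append {}; value truthy → result[-1][i % 10 + 1] = value
def pvFlatStep (st : Int × List (PySem.Dict Int String)) (v : String) :
    Int × List (PySem.Dict Int String) :=
  let acc := if PySem.Int.mod st.1 10 = 0 then st.2 ++ [PySem.Dict.empty] else st.2
  let acc := if v ≠ "" then
      acc.dropLast ++ [(acc.getLastD PySem.Dict.empty).insert (PySem.Int.mod st.1 10 + 1) v]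
    else acc
  (st.1 + 1, acc)

def restructure_field_list_alt (fields : List String) : List (List (Int × String)) :=
  ((fields.foldl pvFlatStep (0, [])).2).map PySem.Dict.items

-- ===== PRECONDITION & SPEC =====
-- A's assert raises AssertionError unless len(fields) is a multiple of 10
def Pre_restructure_field_list (fields : List String) : Prop := fields.length % 10 = 0
instance (fields : List String) : Decidable (Pre_restructure_field_list fields) := by
  unfold Pre_restructure_field_list; infer_instance

def pvWitness_restructure_field_list : List String :=
  ["m01s03i236", "temp_at_screen_level", "", "", "", "", "", "", "", ""]

def Spec_restructure_field_list (fields : List String) (out : List (List (Int × String))) : Prop := out = restructure_field_list_alt fields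
instance (fields : List String) (out : List (List (Int × String))) : Decidable (Spec_restructure_field_list fields out) := by unfold Spec_restructure_field_list; infer_instance

-- ===== CLAIM (what is proved, stated in full; the proofs are below) =====
def Claim_equal_restructure_field_list : Prop := ∀ (fields : List String), Dom_restructure_field_list fields → Pre_restructure_field_list fields → Spec_restructure_field_list fields (restructure_field_list fields)

-- ===== LEMMAS AND PROOFS =====

-- shared description of one chunk's dict: fold g with local counter j (next key j + 1)
def pvInner (g : List String) (j : Int) (d : PySem.Dict Int String) : PySem.Dict Int String :=
  match g with
  | [] => d
  | v :: g => pvInner g (j + 1) (if v ≠ "" then d.insert (j + 1) v else d)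

lemma pvChunk_eq_inner (g : List String) (j : Int) (d : PySem.Dict Int String) :
    (g.foldl pvChunkStep (j, d)).2 = pvInner g j d := by
  induction g generalizing j d with
  | nil => rfl
  | cons v g ih => rw [List.foldl_cons, pvChunkStep]; exact ih (j + 1) _

lemma pvFlat_chunk (g : List String) (j : Int) (base : Int)
    (h1 : 1 ≤ j) (h2 : j + g.length ≤ 10) (hb : base % 10 = 0)
    (acc : List (PySem.Dict Int String)) (d : PySem.Dict Int String) :
    g.foldl pvFlatStep (base + j, acc ++ [d]) =
      (base + j + g.length, acc ++ [pvInner g j d]) := by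
  induction g generalizing j d with
  | nil => simp [pvInner]
  | cons v g ih =>
    have hm : PySem.Int.mod (base + j) 10 = j := by
      rw [PySem.Int.mod_eq_emod_of_pos (by omega)]
      simp at h2; omega
    rw [List.foldl_cons]
    have hstep : pvFlatStep (base + j, acc ++ [d]) v =
        (base + j + 1, acc ++ [if v ≠ "" then d.insert (j + 1) v else d]) := by
      simp only [pvFlatStep, hm]
      have hj : ¬ (j = 0) := by omega
      rw [if_neg hj]
      split <;> simp
    rw [hstep]
    have he : base + j + 1 = base + (j + 1) := by ring
    rw [he, ih (j + 1) (by omega) (by simp at h2 ⊢; omega) _]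
    simp only [pvInner, List.length_cons, Prod.mk.injEq]
    constructor
    · push_cast; ring
    · trivial

lemma pvFlat_all (n : Nat) (fields : List String) (hn : fields.length = n)
    (h10 : n % 10 = 0) (base : Int) (hb : base % 10 = 0)
    (acc : List (PySem.Dict Int String)) :
    fields.foldl pvFlatStep (base, acc) =
      (base + n, acc ++ (pvBatched fields).map (fun g => pvInner g 0 PySem.Dict.empty)) := by
  induction n using Nat.strong_induction_on generalizing fields base acc with
  | _ n ih =>
    match fields with
    | [] =>
      simp at hn; subst hn
      rw [pvBatched]
      simp
    | v :: t =>
      simp only [List.length_cons] at hn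
      have ht : 9 ≤ t.length := by omega
      have hm0 : PySem.Int.mod base 10 = 0 := by
        rw [PySem.Int.mod_eq_emod_of_pos (by omega)]; omega
      rw [List.foldl_cons]
      have hstep : pvFlatStep (base, acc) v =
          (base + 1, acc ++ [if v ≠ "" then PySem.Dict.empty.insert (0 + 1) v
                             else PySem.Dict.empty]) := by
        simp only [pvFlatStep, hm0]
        split <;> simp
      rw [hstep]
      have hsplit : t = t.take 9 ++ t.drop 9 := (List.take_append_drop 9 t).symm
      have hlen9 : (t.take 9).length = 9 := by simp [List.length_take]; omega
      rw [hsplit, List.foldl_append]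
      rw [pvFlat_chunk (t.take 9) 1 base (by omega)
            (by rw [hlen9]; omega) hb]
      rw [hlen9]
      have h9 : ((9 : Nat) : Int) = 9 := by norm_num
      rw [h9]
      have hrest : (t.drop 9).length = n - 10 := by simp; omega
      rw [ih (n - 10) (by omega) (t.drop 9) hrest (by omega) (base + 1 + 9)
            (by omega) _]
      have hbat : pvBatched (v :: t) = (v :: t.take 9) :: pvBatched (t.drop 9) := by
        rw [pvBatched]
        simp [List.take_succ_cons, List.drop_succ_cons]
      rw [← hsplit, hbat]
      simp only [List.map_cons, Prod.mk.injEq, pvInner, List.append_assoc,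
        List.singleton_append, zero_add]
      refine ⟨by omega, ?_⟩
      trivial

-- ===== VERDICT (by name: the statement is the Claim_ definition above) =====
theorem restructure_field_list_spec : Claim_equal_restructure_field_list := by
  intro fields _ hpre
  unfold Spec_restructure_field_list restructure_field_list restructure_field_list_alt
  rw [pvFlat_all fields.length fields rfl hpre 0 (by omega) []]
  simp [pvChunk_eq_inner]
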